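-- pv_equiv track=rewrite | github.com/bakkijeshwanth123-dev/CONSUMER | serpent.py | apply_sbox
-- ===== SOURCE A (Python) =====
-- S_BOXES = [
--     [3, 8, 15, 1, 10, 6, 5, 11, 14, 13, 4, 2, 7, 0, 9, 12],
--     [15, 12, 2, 7, 9, 0, 5, 10, 1, 11, 14, 8, 6, 13, 3, 4],
--     [8, 6, 7, 9, 3, 12, 10, 15, 13, 1, 14, 4, 0, 11, 5, 2],
--     [0, 15, 11, 8, 12, 9, 6, 3, 13, 1, 2, 4, 10, 7, 5, 14],
--     [1, 15, 8, 3, 12, 0, 11, 6, 2, 5, 4, 10, 9, 14, 7, 13],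
--     [15, 5, 2, 11, 4, 10, 9, 12, 0, 3, 14, 8, 13, 6, 7, 1],
--     [7, 2, 12, 5, 8, 4, 6, 11, 14, 9, 1, 15, 13, 3, 10, 0],
--     [1, 13, 15, 0, 14, 8, 2, 11, 7, 4, 12, 10, 9, 3, 5, 6]
-- ]
--
-- def apply_sbox(state, sbox_idx):
--     result = [0, 0, 0, 0]
--     sbox = S_BOXES[sbox_idx]
--     for j in range(32):
--         input_bits = 0
--         for b in range(4):
--             input_bits |= ((state[b] >> j) & 1) << b
--         output_bits = sbox[input_bits]
--         for b in range(4):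
--             result[b] |= ((output_bits >> b) & 1) << j
--     return result
-- ===== SOURCE B (Python) =====
-- S_BOXES = [
--     [3, 8, 15, 1, 10, 6, 5, 11, 14, 13, 4, 2, 7, 0, 9, 12],
--     [15, 12, 2, 7, 9, 0, 5, 10, 1, 11, 14, 8, 6, 13, 3, 4],
--     [8, 6, 7, 9, 3, 12, 10, 15, 13, 1, 14, 4, 0, 11, 5, 2],
--     [0, 15, 11, 8, 12, 9, 6, 3, 13, 1, 2, 4, 10, 7, 5, 14],
--     [1, 15, 8, 3, 12, 0, 11, 6, 2, 5, 4, 10, 9, 14, 7, 13],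
--     [15, 5, 2, 11, 4, 10, 9, 12, 0, 3, 14, 8, 13, 6, 7, 1],
--     [7, 2, 12, 5, 8, 4, 6, 11, 14, 9, 1, 15, 13, 3, 10, 0],
--     [1, 13, 15, 0, 14, 8, 2, 11, 7, 4, 12, 10, 9, 3, 5, 6]
-- ]
--
-- def apply_sbox(state, sbox_idx):
--     sbox = S_BOXES[sbox_idx]
--     # phase 1+2: transpose the state into 32 nibbles and map them through the S-box
--     nib = [sbox[((state[0] >> j) & 1)
--                 + 2 * ((state[1] >> j) & 1)
--                 + 4 * ((state[2] >> j) & 1)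
--                 + 8 * ((state[3] >> j) & 1)]
--            for j in range(32)]
--     # phase 3: rebuild each output word back-to-front by Horner's rule on its bit-plane
--     out = []
--     for b in range(4):
--         word = 0
--         for v in reversed(nib):
--             word = word * 2 + ((v >> b) & 1)
--         out.append(word)
--     return out
-- ===== Notes on version B (the rewrite author's own statement) =====
-- stated objective: alternative
-- what changed: A fuses gather, S-box lookup and scatter into one range(32) loop that ORs bits into a mutable 4-word result; B first builds an explicit 32-entry table of S-box outputs by transposing the state (one comprehension), then reconstructs each of the four output words separately by a back-to-front Horner fold (word = word*2 + bit) over the reversed table, with no bitwise OR and no in-place updates.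
import Mathlib
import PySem

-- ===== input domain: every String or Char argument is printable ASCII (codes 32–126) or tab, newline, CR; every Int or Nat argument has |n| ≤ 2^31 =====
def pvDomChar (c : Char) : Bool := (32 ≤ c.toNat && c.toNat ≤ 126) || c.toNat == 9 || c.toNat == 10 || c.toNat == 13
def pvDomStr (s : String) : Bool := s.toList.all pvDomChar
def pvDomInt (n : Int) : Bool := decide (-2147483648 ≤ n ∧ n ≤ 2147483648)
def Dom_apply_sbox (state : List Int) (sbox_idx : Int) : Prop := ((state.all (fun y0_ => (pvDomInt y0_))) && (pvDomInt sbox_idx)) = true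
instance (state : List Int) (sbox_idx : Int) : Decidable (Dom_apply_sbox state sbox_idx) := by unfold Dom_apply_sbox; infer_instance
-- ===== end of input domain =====

-- B replaces A's single fused gather-lookup-scatter loop by a transpose-map pass producing the 32
-- S-box outputs followed by a per-word back-to-front Horner reconstruction (objective: alternative decomposition).

-- ===== PORT A =====
def pySBoxes : List (List Int) :=
  [[3, 8, 15, 1, 10, 6, 5, 11, 14, 13, 4, 2, 7, 0, 9, 12],
   [15, 12, 2, 7, 9, 0, 5, 10, 1, 11, 14, 8, 6, 13, 3, 4],
   [8, 6, 7, 9, 3, 12, 10, 15, 13, 1, 14, 4, 0, 11, 5, 2],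
   [0, 15, 11, 8, 12, 9, 6, 3, 13, 1, 2, 4, 10, 7, 5, 14],
   [1, 15, 8, 3, 12, 0, 11, 6, 2, 5, 4, 10, 9, 14, 7, 13],
   [15, 5, 2, 11, 4, 10, 9, 12, 0, 3, 14, 8, 13, 6, 7, 1],
   [7, 2, 12, 5, 8, 4, 6, 11, 14, 9, 1, 15, 13, 3, 10, 0],
   [1, 13, 15, 0, 14, 8, 2, 11, 7, 4, 12, 10, 9, 3, 5, 6]]

-- named loop body of A's 'for j in range(32)': gather input_bits, S-box lookup, scatter into result.
-- Shift amounts j and b are range(32)/range(4) indices, hence nonnegative: '.toNat' is exact there.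
def aStep (state sbox result : List Int) (j : Int) : List Int :=
  let input_bits : Int :=
    (PySem.List.pyRange 0 4 1).foldl (fun input_bits b =>
      PySem.Int.bor input_bits
        (PySem.Int.band (PySem.List.pyGetD state b 0 >>> j.toNat) 1 <<< b.toNat)) 0
  let output_bits : Int := PySem.List.pyGetD sbox input_bits 0
  (PySem.List.pyRange 0 4 1).foldl (fun result b =>
    PySem.List.pySetD result b
      (PySem.Int.bor (PySem.List.pyGetD result b 0)
        (PySem.Int.band (output_bits >>> b.toNat) 1 <<< j.toNat))) result

def apply_sbox (state : List Int) (sbox_idx : Int) : List Int :=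
  let result : List Int := [0, 0, 0, 0]
  let sbox : List Int := PySem.List.pyGetD pySBoxes sbox_idx []
  (PySem.List.pyRange 0 32 1).foldl (aStep state sbox) result

-- ===== PORT B =====
-- B phase 1+2: transpose the state into 32 nibbles, each already mapped through the S-box
def bNib (state sbox : List Int) : List Int :=
  (PySem.List.pyRange 0 32 1).map (fun j =>
    PySem.List.pyGetD sbox
      (PySem.Int.band (PySem.List.pyGetD state 0 0 >>> j.toNat) 1
        + 2 * PySem.Int.band (PySem.List.pyGetD state 1 0 >>> j.toNat) 1
        + 4 * PySem.Int.band (PySem.List.pyGetD state 2 0 >>> j.toNat) 1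
        + 8 * PySem.Int.band (PySem.List.pyGetD state 3 0 >>> j.toNat) 1) 0)

-- B phase 3: Horner reconstruction of bit-plane b from the reversed nibble list
def bWord (nib : List Int) (b : Int) : Int :=
  nib.reverse.foldl (fun (word v : Int) => word * 2 + PySem.Int.band (v >>> b.toNat) 1) 0

def apply_sbox_alt (state : List Int) (sbox_idx : Int) : List Int :=
  let sbox : List Int := PySem.List.pyGetD pySBoxes sbox_idx []
  let nib : List Int := bNib state sbox
  (PySem.List.pyRange 0 4 1).foldl (fun out b => out ++ [bWord nib b]) []

-- ===== PRECONDITION & SPEC =====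
-- Pre_: exactly where the Python A returns normally: state needs at least 4 words and sbox_idx must be
-- a valid (possibly negative) Python index into the 8 S-boxes; otherwise A raises IndexError.
def Pre_apply_sbox (state : List Int) (sbox_idx : Int) : Prop :=
  4 ≤ state.length ∧ -8 ≤ sbox_idx ∧ sbox_idx < 8
instance (state : List Int) (sbox_idx : Int) : Decidable (Pre_apply_sbox state sbox_idx) := by
  unfold Pre_apply_sbox; infer_instance

def pvWitness_apply_sbox : List Int × Int := ([1, 2, 3, 4], 0)

def Spec_apply_sbox (state : List Int) (sbox_idx : Int) (out : List Int) : Prop :=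
  out = apply_sbox_alt state sbox_idx
instance (state : List Int) (sbox_idx : Int) (out : List Int) : Decidable (Spec_apply_sbox state sbox_idx out) := by
  unfold Spec_apply_sbox; infer_instance

-- ===== CLAIM (what is proved, stated in full; the proofs are below) =====
def Claim_equal_apply_sbox : Prop := ∀ (state : List Int) (sbox_idx : Int), Dom_apply_sbox state sbox_idx → Pre_apply_sbox state sbox_idx → Spec_apply_sbox state sbox_idx (apply_sbox state sbox_idx)

-- ===== LEMMAS AND PROOFS =====

-- bit j of input word i
def gbit (state : List Int) (i : Int) (j : Nat) : Int :=
  PySem.Int.band (PySem.List.pyGetD state i 0 >>> j) 1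

-- the S-box output for bit position j
def nibF (state sbox : List Int) (j : Nat) : Int :=
  PySem.List.pyGetD sbox
    (gbit state 0 j + 2 * gbit state 1 j + 4 * gbit state 2 j + 8 * gbit state 3 j) 0

-- bit b of the S-box output at position j
def cbit (state sbox : List Int) (b j : Nat) : Int :=
  PySem.Int.band (nibF state sbox j >>> b) 1

-- partial sum Σ_{j<n} c j * 2^j: the common characterisation of both programs' output words
def psum (c : Nat → Int) : Nat → Int
  | 0 => 0
  | n + 1 => psum c n + c n * 2 ^ n

theorem band_one_cases (x : Int) : PySem.Int.band x 1 = 0 ∨ PySem.Int.band x 1 = 1 := by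
  rw [PySem.Int.band_one]
  have h1 := PySem.Int.mod_nonneg x (b := 2) (by omega)
  have h2 := PySem.Int.mod_lt x (b := 2) (by omega)
  omega

-- A's gather loop (an OR of four disjoint shifted bits) is the weighted sum B uses
theorem gather_eq (x0 x1 x2 x3 : Int)
    (h0 : x0 = 0 ∨ x0 = 1) (h1 : x1 = 0 ∨ x1 = 1) (h2 : x2 = 0 ∨ x2 = 1) (h3 : x3 = 0 ∨ x3 = 1) :
    PySem.Int.bor (PySem.Int.bor (PySem.Int.bor (PySem.Int.bor 0 (x0 <<< (0:Nat))) (x1 <<< (1:Nat))) (x2 <<< (2:Nat))) (x3 <<< (3:Nat))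
      = x0 + 2 * x1 + 4 * x2 + 8 * x3 := by
  rcases h0 with rfl | rfl <;> rcases h1 with rfl | rfl <;>
    rcases h2 with rfl | rfl <;> rcases h3 with rfl | rfl <;> decide

theorem psum_congr (c c' : Nat → Int) (h : ∀ j, c j = c' j) (n : Nat) :
    psum c n = psum c' n := by
  induction n with
  | zero => rfl
  | succ n ih => simp [psum, ih, h n]

theorem psum_bounds (c : Nat → Int) (hc : ∀ j, c j = 0 ∨ c j = 1) (n : Nat) :
    0 ≤ psum c n ∧ psum c n < 2 ^ n := by
  induction n with
  | zero => simp [psum]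
  | succ n ih =>
    have hp : (0:Int) < 2 ^ n := by positivity
    rcases hc n with h | h <;> simp [psum, h, pow_succ] <;> omega

theorem lor_two_pow_of_lt (n : Nat) : ∀ m : Nat, m < 2 ^ n → m ||| 2 ^ n = m + 2 ^ n := by
  induction n with
  | zero => intro m h; interval_cases m; decide
  | succ n ih =>
    intro m h
    have h1 : (m ||| 2 ^ (n + 1)) / 2 = m / 2 ||| 2 ^ n := by
      rw [Nat.or_div_two]; congr 1; omega
    have h2 : (m ||| 2 ^ (n + 1)) % 2 = m % 2 := by
      have := Nat.or_mod_two_eq_one (a := m) (b := 2 ^ (n + 1))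
      have hz : (2 : Nat) ^ (n + 1) % 2 = 0 := by
        have : (2 : Nat) ^ (n + 1) = 2 * 2 ^ n := by ring
        omega
      rcases Nat.mod_two_eq_zero_or_one (m ||| 2 ^ (n + 1)) with hh | hh <;>
        rcases Nat.mod_two_eq_zero_or_one m with hm | hm <;> simp_all
    have hd : m / 2 < 2 ^ n := by
      have : (2 : Nat) ^ (n + 1) = 2 * 2 ^ n := by ring
      omega
    have := ih (m / 2) hd
    have hp : (2 : Nat) ^ (n + 1) = 2 * 2 ^ n := by ring
    omega

-- A's '|=' of the next bit into an accumulator holding only lower bits is exactly one psum step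
theorem bor_psum_step (c : Nat → Int) (hc : ∀ j, c j = 0 ∨ c j = 1) (n : Nat) :
    PySem.Int.bor (psum c n) (c n <<< n) = psum c (n + 1) := by
  obtain ⟨h0, h1⟩ := psum_bounds c hc n
  rcases hc n with h | h
  · simp [psum, h, Int.shiftLeft_eq]
  · have hs : c n <<< n = (2 ^ n : Int) := by rw [h, Int.shiftLeft_eq, one_mul]
    rw [hs, PySem.Int.bor_of_nonneg h0 (by positivity)]
    have ht : ((2 ^ n : Int)).toNat = 2 ^ n := by
      have : (2 ^ n : Int) = ((2 ^ n : Nat) : Int) := by push_cast; ring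
      rw [this, Int.toNat_natCast]
    have hlt : (psum c n).toNat < 2 ^ n := by omega
    rw [ht, lor_two_pow_of_lt n _ hlt]
    simp [psum, h]
    omega

theorem aStep_eq (state sbox : List Int) (r0 r1 r2 r3 : Int) (j : Int) :
    aStep state sbox [r0, r1, r2, r3] j =
      [PySem.Int.bor r0 (cbit state sbox 0 j.toNat <<< j.toNat),
       PySem.Int.bor r1 (cbit state sbox 1 j.toNat <<< j.toNat),
       PySem.Int.bor r2 (cbit state sbox 2 j.toNat <<< j.toNat),
       PySem.Int.bor r3 (cbit state sbox 3 j.toNat <<< j.toNat)] := by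
  unfold cbit nibF gbit
  rw [← gather_eq _ _ _ _ (band_one_cases _) (band_one_cases _) (band_one_cases _) (band_one_cases _)]
  rfl

-- invariant of A's outer loop: after n iterations result holds the four partial bit-plane sums
theorem aMain (state sbox : List Int) (n : Nat) :
    (PySem.List.pyRange 0 (n : Int) 1).foldl (aStep state sbox) [0, 0, 0, 0] =
      [psum (cbit state sbox 0) n, psum (cbit state sbox 1) n,
       psum (cbit state sbox 2) n, psum (cbit state sbox 3) n] := by
  induction n with
  | zero => rfl
  | succ n ih =>
    have hcast : ((n + 1 : Nat) : Int) = (n : Int) + 1 := by push_cast; ring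
    rw [hcast, PySem.List.pyRange_one_succ_right (by positivity), List.foldl_append, ih]
    simp only [List.foldl]
    rw [aStep_eq]
    simp only [Int.toNat_natCast]
    rw [bor_psum_step (cbit state sbox 0) (fun j => band_one_cases _) n,
        bor_psum_step (cbit state sbox 1) (fun j => band_one_cases _) n,
        bor_psum_step (cbit state sbox 2) (fun j => band_one_cases _) n,
        bor_psum_step (cbit state sbox 3) (fun j => band_one_cases _) n]

-- B's back-to-front Horner fold over a mapped range computes the same partial sums
theorem foldr_horner (g f : Int → Int) (n : Nat) (a : Int) :
    ((PySem.List.pyRange 0 (n : Int) 1).map f).foldr (fun v w => w * 2 + g v) a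
      = psum (fun j => g (f (j : Int))) n + a * 2 ^ n := by
  induction n generalizing a with
  | zero => simp [psum]
  | succ n ih =>
    have hcast : ((n + 1 : Nat) : Int) = (n : Int) + 1 := by push_cast; ring
    rw [hcast, PySem.List.pyRange_one_succ_right (by positivity), List.map_append,
        List.foldr_append]
    simp only [List.map, List.foldr]
    rw [ih]
    simp [psum, pow_succ]
    ring

theorem bWord_eq (state sbox : List Int) (b : Nat) :
    bWord (bNib state sbox) (b : Int) = psum (cbit state sbox b) 32 := by
  unfold bWord bNib
  rw [List.foldl_reverse]
  have h32 : (32 : Int) = ((32 : Nat) : Int) := by norm_num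
  rw [h32, foldr_horner]
  rw [psum_congr _ (cbit state sbox b) (fun j => by simp [cbit, nibF, gbit, Int.shiftRight_natCast_right])]
  simp

-- ===== VERDICT (by name: the statement is the Claim_ definition above) =====
theorem apply_sbox_spec : Claim_equal_apply_sbox := by
  intro state sbox_idx _ _
  unfold Spec_apply_sbox apply_sbox apply_sbox_alt
  have hb : ∀ b : Nat, bWord (bNib state (PySem.List.pyGetD pySBoxes sbox_idx [])) (b : Int)
      = psum (cbit state (PySem.List.pyGetD pySBoxes sbox_idx []) b) 32 :=
    bWord_eq state _
  have h0 := hb 0; have h1 := hb 1; have h2 := hb 2; have h3 := hb 3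
  norm_num at h0 h1 h2 h3
  show (PySem.List.pyRange 0 32 1).foldl (aStep state _) [0,0,0,0] =
    [bWord _ 0, bWord _ 1, bWord _ 2, bWord _ 3]
  have h32 : (32 : Int) = ((32 : Nat) : Int) := by norm_num
  rw [h32, aMain, h0, h1, h2, h3]
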